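-- pv_equiv track=rewrite | github.com/felipemarkson/dssdata | dssdata/__init__.py | _remove_comments_dss
-- ===== SOURCE A (Python) =====
-- from typing import Iterable, List
--
-- def _remove_comments_dss(list_cmd: List[str]) -> List[str]:
--
--     vanished: List[str] = []
--     in_a_comment = False
--     for cmd in list_cmd:
--         if cmd.strip().startswith("/*"):
--             in_a_comment = True
--             continue
--         elif cmd.strip().endswith("*/"):
--             in_a_comment = False
--             continue
--         if in_a_comment:
--             continue
--         elif cmd.strip().startswith("!"):
--             continue
--         elif cmd.strip().startswith("//"):
--             continue
--         elif len(cmd.strip()) == 0: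
--             continue
--
--         if cmd.strip().startswith("~"):
--             vanished[-1] += cmd.strip()[1:].split("!")[0]
--         else:
--             vanished.append(cmd.strip())
--
--     return vanished
-- ===== SOURCE B (Python) =====
-- from typing import List
--
--
-- def _remove_comments_dss(list_cmd: List[str]) -> List[str]:
--     # Pass 1: drop block comments, '!'/'//' comments and blank lines,
--     # keeping stripped lines (continuations '~...' included).
--     kept: List[str] = []
--     in_a_comment = False
--     for cmd in list_cmd:
--         line = cmd.strip()
--         if line.startswith("/*"):
--             in_a_comment = True
--         elif line.endswith("*/"):
--             in_a_comment = False
--         elif in_a_comment or not line or line.startswith("!") or line.startswith("//"):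
--             pass
--         else:
--             kept.append(line)
--     # Pass 2: fold '~' continuation lines into the previous command.
--     result: List[str] = []
--     for line in kept:
--         if line.startswith("~"):
--             result[-1] += line[1:].split("!")[0]
--         else:
--             result.append(line)
--     return result
-- ===== Notes on version B (the rewrite author's own statement) =====
-- stated objective: alternative
-- what changed: Replaces A's single loop with interleaved comment-state and continuation-merge logic by two separate linear passes: a comment/blank filter producing stripped lines, then a fold that merges '~' continuation lines into the previous command.
import Mathlib
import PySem

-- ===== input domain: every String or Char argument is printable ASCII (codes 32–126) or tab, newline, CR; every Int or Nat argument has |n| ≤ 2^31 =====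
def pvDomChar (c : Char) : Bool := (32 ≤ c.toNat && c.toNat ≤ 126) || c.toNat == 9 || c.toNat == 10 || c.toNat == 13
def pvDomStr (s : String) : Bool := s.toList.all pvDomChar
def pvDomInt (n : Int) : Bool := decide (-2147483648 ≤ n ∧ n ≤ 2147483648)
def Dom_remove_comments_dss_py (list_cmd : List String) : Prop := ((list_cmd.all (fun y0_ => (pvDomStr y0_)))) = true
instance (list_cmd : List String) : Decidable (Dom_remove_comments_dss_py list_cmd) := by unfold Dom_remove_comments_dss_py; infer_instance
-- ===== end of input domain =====

-- B replaces A's single loop (comment state and '~'-merging interleaved) by two separate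
-- linear passes: a comment/blank filter, then a fold merging '~' continuation lines (alternative).
-- On a '~' continuation with no preceding command both Pythons raise IndexError (excluded by Pre_).

-- models `xs[-1] += v`; the none case (Python: IndexError) is excluded by Pre_
def pvAppendLast (xs : List String) (v : String) : List String :=
  match xs.getLast? with
  | none => xs
  | some l => xs.dropLast ++ [l ++ v]

-- `line[1:].split("!")[0]` applied to a stripped line
def pvContPiece (s : String) : String :=
  (((PySem.Str.split? (PySem.Str.slice s (some 1) none) "!").getD []).headD "")

-- ===== PORT A =====
def removeStepA (st : List String × Bool) (cmd : String) : List String × Bool :=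
  let s := PySem.Str.strip cmd
  if PySem.Str.startswith s "/*" then (st.1, true)
  else if PySem.Str.endswith s "*/" then (st.1, false)
  else if st.2 then st
  else if PySem.Str.startswith s "!" then st
  else if PySem.Str.startswith s "//" then st
  else if PySem.Str.len s = 0 then st
  else if PySem.Str.startswith s "~" then (pvAppendLast st.1 (pvContPiece s), st.2)
  else (st.1 ++ [s], st.2)

def remove_comments_dss_py (list_cmd : List String) : List String :=
  (list_cmd.foldl removeStepA ([], false)).1

-- ===== PORT B =====
-- pass 1: drop block comments, '!'/'//' comments and blank lines, keep stripped lines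
def pvFilt (b : Bool) : List String → List String
  | [] => []
  | c :: t =>
    let s := PySem.Str.strip c
    if PySem.Str.startswith s "/*" then pvFilt true t
    else if PySem.Str.endswith s "*/" then pvFilt false t
    else if b || PySem.Str.len s = 0 || PySem.Str.startswith s "!"
            || PySem.Str.startswith s "//" then pvFilt b t
    else s :: pvFilt b t

-- pass 2: fold '~' continuation lines into the previous command
def pvFuse (acc : List String) : List String → List String
  | [] => acc
  | s :: t =>
    if PySem.Str.startswith s "~" then pvFuse (pvAppendLast acc (pvContPiece s)) t
    else pvFuse (acc ++ [s]) t

def remove_comments_dss_py_alt (list_cmd : List String) : List String :=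
  pvFuse [] (pvFilt false list_cmd)

-- ===== PRECONDITION & SPEC =====
-- closed-form shape predicates on the input lines (no loop state):
-- a comment-marker line ('/*'-start or '*/'-end, in A's elif order)
def pvMarker (l : String) : Bool :=
  PySem.Str.startswith (PySem.Str.strip l) "/*" || PySem.Str.endswith (PySem.Str.strip l) "*/"

-- position i is outside a block comment iff the last marker line before it is not an opener
def pvActiveAt (L : List String) (i : Nat) : Bool :=
  match ((L.take i).filter pvMarker).getLast? with
  | none => true
  | some m => !(PySem.Str.startswith (PySem.Str.strip m) "/*")

-- a line that survives the comment/blank/'!'/'//' filter when outside a block comment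
def pvSurv (l : String) : Bool :=
  !(pvMarker l) && !(decide (PySem.Str.len (PySem.Str.strip l) = 0))
    && !(PySem.Str.startswith (PySem.Str.strip l) "!")
    && !(PySem.Str.startswith (PySem.Str.strip l) "//")

-- Pre_ excludes exactly the inputs whose FIRST surviving non-comment line is a '~' continuation
-- (a continuation with no command before it): there BOTH Pythons raise IndexError on
-- vanished[-1] / result[-1]; Pre_ excludes no input on which A returns a value.
def pvPreB (L : List String) : Bool :=
  (List.range L.length).all (fun i =>
    !(pvActiveAt L i && pvSurv (L.getD i "")
        && (List.range i).all (fun j => !(pvActiveAt L j && pvSurv (L.getD j "")))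
        && PySem.Str.startswith (PySem.Str.strip (L.getD i "")) "~"))

def Pre_remove_comments_dss_py (list_cmd : List String) : Prop :=
  pvPreB list_cmd = true
instance (list_cmd : List String) : Decidable (Pre_remove_comments_dss_py list_cmd) := by
  unfold Pre_remove_comments_dss_py; infer_instance

def pvWitness_remove_comments_dss_py : List String := ["a cmd", "~ more"]

def Spec_remove_comments_dss_py (list_cmd : List String) (out : List String) : Prop := out = remove_comments_dss_py_alt list_cmd
instance (list_cmd : List String) (out : List String) : Decidable (Spec_remove_comments_dss_py list_cmd out) := by unfold Spec_remove_comments_dss_py; infer_instance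

-- ===== CLAIM (what is proved, stated in full; the proofs are below) =====
def Claim_equal_remove_comments_dss_py : Prop := ∀ (list_cmd : List String), Dom_remove_comments_dss_py list_cmd → Pre_remove_comments_dss_py list_cmd → Spec_remove_comments_dss_py list_cmd (remove_comments_dss_py list_cmd)

-- ===== LEMMAS AND PROOFS =====
theorem foldA_eq_fuse_filt (L : List String) :
    ∀ (acc : List String) (b : Bool),
      (L.foldl removeStepA (acc, b)).1 = pvFuse acc (pvFilt b L) := by
  induction L with
  | nil => intro acc b; rfl
  | cons c t ih =>
    intro acc b
    simp only [List.foldl_cons, removeStepA, pvFilt]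
    by_cases h1 : PySem.Chars.startswith (PySem.Chars.strip c.toList) ['/', '*'] = true
    · simp [h1, ih]
    · by_cases h2 : PySem.Chars.endswith (PySem.Chars.strip c.toList) ['*', '/'] = true
      · simp [h1, h2, ih]
      · by_cases hb : b = true
        · simp [h1, h2, hb, ih]
        · by_cases h3 : PySem.Chars.startswith (PySem.Chars.strip c.toList) ['!'] = true
          · simp [h1, h2, hb, h3, ih]
          · by_cases h4 : PySem.Chars.startswith (PySem.Chars.strip c.toList) ['/', '/'] = true
            · simp [h1, h2, hb, h3, h4, ih]
            · by_cases h5 : PySem.Chars.strip c.toList = []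
              · have hsw : PySem.Chars.startswith ([] : List Char) ['/', '*'] = false := by decide
                simp [hb, h5, hsw, ih]
              · by_cases h6 : PySem.Chars.startswith (PySem.Chars.strip c.toList) ['~'] = true
                · simp [h1, h2, hb, h3, h4, h5, h6, ih, pvFuse]
                · simp [h1, h2, hb, h3, h4, h5, h6, ih, pvFuse]

-- ===== VERDICT (by name: the statement is the Claim_ definition above) =====
theorem remove_comments_dss_py_spec : Claim_equal_remove_comments_dss_py := by
  intro L _ _
  unfold Spec_remove_comments_dss_py remove_comments_dss_py remove_comments_dss_py_alt
  exact foldA_eq_fuse_filt L [] false
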